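-- pv_equiv track=rewrite | github.com/jmmichaud/BioinfoTools | FindDNAboxfromGenome.py | GCSkew
-- ===== SOURCE A (Python) =====
-- def GCSkew(text):
--     """Inputs DNA as a text string.  Scores each G base +1 and each C as -1.
--     Outputs score at each base as a list of integers.
--     """
--     skew = []
--     skew_calc = 0
--     skew.append(skew_calc)
--     text = text.upper()
--     for base in text:
--         if base == 'C':
--             skew_calc -= 1
--         elif base == 'G':
--             skew_calc += 1
--         skew.append(skew_calc)
--     return skew
-- ===== SOURCE B (Python) =====
-- def GCSkew(text):
--     """Inputs DNA as a text string.  Scores each G base +1 and each C as -1.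
--     Outputs score at each base as a list of integers.
--     """
--     # Walk the string BACKWARDS, recording skew measured relative to the end,
--     # then reverse and shift everything by the final offset so position 0 is 0.
--     suffix = []
--     s = 0
--     for b in reversed(text.upper()):
--         suffix.append(s)
--         s -= 1 if b == 'G' else -1 if b == 'C' else 0
--     suffix.append(s)
--     return [x - s for x in reversed(suffix)]
-- ===== Notes on version B (the rewrite author's own statement) =====
-- stated objective: alternative
-- what changed: Builds the result back-to-front: traverses the string in reverse accumulating end-relative skews, then reverses and normalizes every entry by the final offset, instead of A's forward prefix-sum with an inline accumulator.
import Mathlib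
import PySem

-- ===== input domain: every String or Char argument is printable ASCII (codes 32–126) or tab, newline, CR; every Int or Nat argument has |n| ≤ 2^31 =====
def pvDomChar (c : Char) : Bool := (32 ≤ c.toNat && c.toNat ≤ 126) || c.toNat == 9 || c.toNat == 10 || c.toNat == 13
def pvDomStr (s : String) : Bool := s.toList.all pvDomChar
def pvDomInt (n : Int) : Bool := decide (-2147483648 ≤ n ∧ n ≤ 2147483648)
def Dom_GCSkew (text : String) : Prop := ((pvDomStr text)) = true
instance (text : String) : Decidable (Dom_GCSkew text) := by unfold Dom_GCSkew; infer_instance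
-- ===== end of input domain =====

-- B builds the result back-to-front: a reverse traversal accumulating end-relative skews,
-- then a reversal plus a shift by the final offset; same cost, alternative algorithm shape.

-- ===== PORT A =====
def GCSkew (text : String) : List Int :=
  -- skew = [0]; skew_calc = 0; for base in text.upper(): …; skew.append(skew_calc)
  ((PySem.Str.upper text).toList.foldl
    (fun (p : List Int × Int) base =>
      let skew_calc : Int :=
        if base = 'C' then p.2 - 1 else if base = 'G' then p.2 + 1 else p.2
      (p.1 ++ [skew_calc], skew_calc))
    ([0], 0)).1

-- ===== PORT B =====
def GCSkew_alt (text : String) : List Int :=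
  -- suffix = []; s = 0; for b in reversed(text.upper()): suffix.append(s); s -= …
  let p := (PySem.Str.upper text).toList.reverse.foldl
    (fun (p : List Int × Int) b =>
      (p.1 ++ [p.2],
       p.2 - (if b = 'G' then (1 : Int) else if b = 'C' then -1 else 0)))
    ([], 0)
  -- suffix.append(s); return [x - s for x in reversed(suffix)]
  ((p.1 ++ [p.2]).reverse).map (fun x => x - p.2)

-- ===== PRECONDITION & SPEC =====
def Spec_GCSkew (text : String) (out : List Int) : Prop := out = GCSkew_alt text
instance (text : String) (out : List Int) : Decidable (Spec_GCSkew text out) := by unfold Spec_GCSkew; infer_instance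

-- ===== CLAIM (what is proved, stated in full; the proofs are below) =====
def Claim_equal_GCSkew : Prop := ∀ (text : String), Dom_GCSkew text → Spec_GCSkew text (GCSkew text)

-- ===== LEMMAS AND PROOFS =====

-- delta of one base, and running prefix sums from a start value: the common normal form
def deltaOf (b : Char) : Int :=
  (if b = 'G' then (1 : Int) else 0) - (if b = 'C' then (1 : Int) else 0)

def accumFrom (s : Int) : List Int → List Int
  | [] => []
  | d :: ds => (s + d) :: accumFrom (s + d) ds

theorem sideA (cs : List Char) : ∀ (acc : List Int) (s : Int),
    (cs.foldl
      (fun (p : List Int × Int) base =>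
        let skew_calc : Int :=
          if base = 'C' then p.2 - 1 else if base = 'G' then p.2 + 1 else p.2
        (p.1 ++ [skew_calc], skew_calc))
      (acc, s)).1 = acc ++ accumFrom s (cs.map deltaOf) := by
  induction cs with
  | nil => intro acc s; simp [accumFrom]
  | cons c cs ih =>
    intro acc s
    simp only [List.foldl_cons, List.map_cons, accumFrom]
    rw [ih]
    have : (if c = 'C' then s - 1 else if c = 'G' then s + 1 else s) = s + deltaOf c := by
      unfold deltaOf
      by_cases h1 : c = 'C' <;> by_cases h2 : c = 'G' <;> (simp_all; try ring)
    rw [this, List.append_assoc]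
    rfl

-- shifting every entry of a prefix-sum list shifts its start
theorem accumFrom_sub (c : Int) (ds : List Int) : ∀ (s : Int),
    (accumFrom s ds).map (fun x => x - c) = accumFrom (s - c) ds := by
  induction ds with
  | nil => intro s; simp [accumFrom]
  | cons d ds ih =>
    intro s
    simp only [accumFrom, List.map_cons, ih]
    have : s + d - c = s - c + d := by ring
    rw [this]

-- the reverse fold of B produces the reversed prefix sums starting at s - Σdeltas
theorem sideB (cs : List Char) : ∀ (acc : List Int) (s : Int),
    cs.reverse.foldl
      (fun (p : List Int × Int) b =>
        (p.1 ++ [p.2],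
         p.2 - (if b = 'G' then (1 : Int) else if b = 'C' then -1 else 0)))
      (acc, s)
    = (acc ++ (accumFrom (s - (cs.map deltaOf).sum) (cs.map deltaOf)).reverse,
       s - (cs.map deltaOf).sum) := by
  induction cs with
  | nil => intro acc s; simp [accumFrom]
  | cons c cs ih =>
    intro acc s
    rw [List.reverse_cons, List.foldl_append, ih]
    have hd : (if c = 'G' then (1 : Int) else if c = 'C' then -1 else 0) = deltaOf c := by
      unfold deltaOf
      by_cases h1 : c = 'C' <;> by_cases h2 : c = 'G' <;> simp_all
    simp only [List.foldl_cons, List.foldl_nil, hd, List.map_cons, List.sum_cons]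
    set t := s - (deltaOf c + (cs.map deltaOf).sum) with ht
    have h1 : s - (cs.map deltaOf).sum = t + deltaOf c := by rw [ht]; ring
    rw [h1]
    have h2 : t + deltaOf c - deltaOf c = t := by ring
    rw [h2]
    simp [accumFrom, List.append_assoc]

-- ===== VERDICT (by name: the statement is the Claim_ definition above) =====
theorem GCSkew_spec : Claim_equal_GCSkew := by
  intro text _
  show GCSkew text = GCSkew_alt text
  simp only [GCSkew, GCSkew_alt]
  rw [sideA, sideB]
  simp only [List.nil_append, List.reverse_append, List.reverse_cons, List.reverse_nil,
    List.nil_append, List.reverse_reverse, List.cons_append, List.map_cons, accumFrom_sub]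
  simp
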